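-- pv_equiv track=rewrite | github.com/tommyham/atcoder | abc/ABC277.py | checkStep
-- ===== SOURCE A (Python) =====
-- def checkStep(lad,step=1,root=set([1])):
--     ans=step
--     ladder=lad.get(step)
--     if ladder==None:
--         return ans
--     for l in ladder:
--         if l in root:
--             continue
--         else:
--             root.add(l)
--             height=checkStep(lad,step=l,root=root)
--             root.remove(l)
--             if height>ans:
--                 ans=height
--
--     return ans
-- ===== SOURCE B (Python) =====
-- def checkStep(lad, step=1, root=set([1])):
--     visited = set(root)
--     visited.add(step)
--     stack = [step]
--     ans = step
--     while stack:
--         u = stack.pop()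
--         if u > ans:
--             ans = u
--         for l in lad.get(u, []):
--             if l not in visited:
--                 visited.add(l)
--                 stack.append(l)
--     return ans
-- ===== Notes on version B (the rewrite author's own statement) =====
-- stated objective: alternative
-- what changed: A enumerates all simple paths by recursive backtracking (adding/removing nodes from root); B does one iterative stack-based graph search with a persistent visited set and returns the max node popped.
import Mathlib
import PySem

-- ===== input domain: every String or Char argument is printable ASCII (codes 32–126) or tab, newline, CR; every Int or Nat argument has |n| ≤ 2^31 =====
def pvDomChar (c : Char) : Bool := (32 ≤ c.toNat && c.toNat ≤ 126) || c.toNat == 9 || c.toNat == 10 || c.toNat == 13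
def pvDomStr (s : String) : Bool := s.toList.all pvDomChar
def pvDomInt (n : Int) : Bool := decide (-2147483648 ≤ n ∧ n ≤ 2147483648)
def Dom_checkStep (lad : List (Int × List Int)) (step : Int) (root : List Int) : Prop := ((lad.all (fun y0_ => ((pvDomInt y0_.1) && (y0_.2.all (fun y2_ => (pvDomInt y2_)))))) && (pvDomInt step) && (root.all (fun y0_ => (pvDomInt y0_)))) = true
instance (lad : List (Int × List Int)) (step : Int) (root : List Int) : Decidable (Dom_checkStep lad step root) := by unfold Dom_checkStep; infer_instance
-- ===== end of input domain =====

-- B replaces A's recursive all-simple-paths backtracking by one iterative stack-based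
-- graph search with a persistent visited set; equivalence is about the RETURN value
-- (A mutates `root` transiently during the call but restores it before returning).

-- ===== PORT A =====
-- shared helpers: dict lookup (first match), the node pool and the termination measure
def pvLookup (lad : List (Int × List Int)) (k : Int) : Option (List Int) :=
  (PySem.Dict.mk lad).get? k

def pvAdj (lad : List (Int × List Int)) (k : Int) : List Int :=
  (PySem.Dict.mk lad).getD k []

def pvNodes (lad : List (Int × List Int)) : List Int := lad.flatMap Prod.snd

def pvUnvis (lad : List (Int × List Int)) (visited : List Int) : Nat :=
  ((pvNodes lad).toFinset \ visited.toFinset).card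

-- termination plumbing for port A
theorem pvLookup_subset {lad : List (Int × List Int)} {k : Int} {ladder : List Int}
    (h : pvLookup lad k = some ladder) : ∀ x ∈ ladder, x ∈ pvNodes lad := by
  induction lad with
  | nil => simp [pvLookup, PySem.Dict.get?] at h
  | cons p rest ih =>
    rw [pvLookup] at h ih
    rw [show PySem.Dict.mk (p :: rest) = (PySem.Dict.mk ((p.1, p.2) :: rest)) by rfl,
      PySem.Dict.get?_mk_cons] at h
    intro x hx
    simp only [pvNodes, List.flatMap_cons, List.mem_append]
    by_cases hk : p.1 == k
    · simp [hk] at h; subst h; exact Or.inl hx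
    · simp [hk] at h; exact Or.inr ((by simpa [pvNodes] using ih h x hx))

theorem pvUnvis_add_lt {lad : List (Int × List Int)} {root : List Int} {l : Int}
    (h1 : l ∈ pvNodes lad) (h2 : l ∉ root) :
    pvUnvis lad (PySem.Set.add root l) < pvUnvis lad root := by
  have hadd : PySem.Set.add root l = root ++ [l] := PySem.Set.add_of_not_mem h2
  apply Finset.card_lt_card
  constructor
  · intro x hx
    simp only [hadd, Finset.mem_sdiff, List.toFinset_append, Finset.mem_union,
      List.mem_toFinset, List.toFinset_cons, Finset.mem_insert] at hx ⊢
    exact ⟨hx.1, fun hc => hx.2 (Or.inl hc)⟩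
  · intro hsub
    have hl : l ∈ (pvNodes lad).toFinset \ root.toFinset := by
      simp [List.mem_toFinset, h1, h2]
    have := hsub hl
    simp [hadd] at this

mutual
def checkStep (lad : List (Int × List Int)) (step : Int) (root : List Int) : Int :=
  -- ans = step; ladder = lad.get(step); if ladder == None: return ans
  match h : pvLookup lad step with
  | none => step
  | some ladder => checkStepGo lad ladder root step (pvLookup_subset h)
termination_by ((pvUnvis lad root, 1, 0) : Nat ×ₗ Nat ×ₗ Nat)
decreasing_by
  apply Prod.Lex.right
  apply Prod.Lex.left
  omega

def checkStepGo (lad : List (Int × List Int)) (ladder : List Int) (root : List Int)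
    (ans : Int) (hsub : ∀ x ∈ ladder, x ∈ pvNodes lad) : Int :=
  -- for l in ladder: skip if l in root, else recurse with root+{l} and keep the max
  match ladder with
  | [] => ans
  | l :: rest =>
    if hl : l ∈ root then
      checkStepGo lad rest root ans (fun x hx => hsub x (List.mem_cons_of_mem _ hx))
    else
      let height := checkStep lad l (PySem.Set.add root l)
      checkStepGo lad rest root (if height > ans then height else ans)
        (fun x hx => hsub x (List.mem_cons_of_mem _ hx))
termination_by ((pvUnvis lad root, 0, ladder.length) : Nat ×ₗ Nat ×ₗ Nat)
decreasing_by
  · apply Prod.Lex.right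
    apply Prod.Lex.right
    simp
  · apply Prod.Lex.left
    exact pvUnvis_add_lt (hsub l (List.mem_cons_self)) hl
  · apply Prod.Lex.right
    apply Prod.Lex.right
    simp
end

-- ===== PORT B =====
-- inner for-loop of B: push each unvisited neighbour, marking it visited
def pvPush (nbrs visited stack : List Int) : List Int × List Int :=
  match nbrs with
  | [] => (visited, stack)
  | l :: rest =>
    if l ∈ visited then pvPush rest visited stack
    else pvPush rest (PySem.Set.add visited l) (l :: stack)

-- termination plumbing for port B: what one pass of pvPush does
theorem pvPush_eq : ∀ (nbrs visited stack : List Int), ∃ news : List Int,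
    pvPush nbrs visited stack = (visited ++ news, news.reverse ++ stack) ∧ news.Nodup ∧
    (∀ x ∈ news, x ∈ nbrs ∧ x ∉ visited) ∧ (∀ x ∈ nbrs, x ∈ visited ∨ x ∈ news) := by
  intro nbrs
  induction nbrs with
  | nil => intro visited stack; exact ⟨[], by simp [pvPush]⟩
  | cons l rest ih =>
    intro visited stack
    rw [pvPush]
    by_cases hl : l ∈ visited
    · obtain ⟨news, heq, hnd, hmem, hcov⟩ := ih visited stack
      refine ⟨news, by simp [hl, heq], hnd, fun x hx => ⟨List.mem_cons_of_mem _ (hmem x hx).1, (hmem x hx).2⟩, ?_⟩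
      intro x hx
      rcases List.mem_cons.mp hx with rfl | hx'
      · exact Or.inl hl
      · exact hcov x hx'
    · obtain ⟨news, heq, hnd, hmem, hcov⟩ := ih (PySem.Set.add visited l) (l :: stack)
      have hadd : PySem.Set.add visited l = visited ++ [l] := PySem.Set.add_of_not_mem hl
      refine ⟨l :: news, ?_, ?_, ?_, ?_⟩
      · simp only [hl, if_false]
        rw [hadd] at heq ⊢
        rw [heq]
        simp
      · refine List.Nodup.cons ?_ hnd
        intro hc
        have := (hmem l hc).2
        simp [hadd] at this
      · intro x hx
        rcases List.mem_cons.mp hx with rfl | hx'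
        · exact ⟨List.mem_cons_self, hl⟩
        · obtain ⟨h1, h2⟩ := hmem x hx'
          refine ⟨List.mem_cons_of_mem _ h1, fun hc => h2 ?_⟩
          simp [hadd, hc]
      · intro x hx
        rcases List.mem_cons.mp hx with rfl | hx'
        · exact Or.inr List.mem_cons_self
        · rcases hcov x hx' with h | h
          · simp [hadd] at h
            rcases h with h | h
            · exact Or.inl h
            · exact Or.inr (by simp [h])
          · exact Or.inr (List.mem_cons_of_mem _ h)

theorem pvAdj_subset {lad : List (Int × List Int)} {u : Int} :
    ∀ x ∈ pvAdj lad u, x ∈ pvNodes lad := by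
  intro x hx
  unfold pvAdj at hx
  rw [PySem.Dict.getD_eq_get?_getD] at hx
  cases h : (PySem.Dict.mk lad).get? u with
  | none => rw [h] at hx; simp at hx
  | some ladder => rw [h] at hx; exact pvLookup_subset (h : pvLookup lad u = some ladder) x hx

def pvM (lad : List (Int × List Int)) (visited stack : List Int) : Nat :=
  pvUnvis lad visited + stack.length

theorem pvStep_lt (lad : List (Int × List Int)) (visited : List Int) (u : Int) (rest : List Int) :
    pvM lad (pvPush (pvAdj lad u) visited rest).1 (pvPush (pvAdj lad u) visited rest).2
      < pvM lad visited (u :: rest) := by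
  obtain ⟨news, heq, hnd, hmem, _⟩ := pvPush_eq (pvAdj lad u) visited rest
  rw [heq]
  simp only [pvM]
  have hsubn : news.toFinset ⊆ (pvNodes lad).toFinset \ visited.toFinset := by
    intro x hx
    rw [List.mem_toFinset] at hx
    simp only [Finset.mem_sdiff, List.mem_toFinset]
    exact ⟨pvAdj_subset x (hmem x hx).1, (hmem x hx).2⟩
  have hset : (pvNodes lad).toFinset \ (visited ++ news).toFinset
      = ((pvNodes lad).toFinset \ visited.toFinset) \ news.toFinset := by
    ext x; simp; tauto
  have hlenn : news.toFinset.card = news.length := List.toFinset_card_of_nodup hnd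
  have hle : news.length ≤ pvUnvis lad visited := by
    have := Finset.card_le_card hsubn
    rw [hlenn] at this
    exact this
  have hcard : pvUnvis lad (visited ++ news) = pvUnvis lad visited - news.length := by
    unfold pvUnvis
    rw [hset, Finset.card_sdiff, Finset.inter_eq_left.mpr hsubn, hlenn]
  rw [hcard]
  simp only [List.length_append, List.length_reverse, List.length_cons]
  omega

def bfsLoop (lad : List (Int × List Int)) (visited stack : List Int) (ans : Int) : Int :=
  match stack with
  | [] => ans
  | u :: rest =>
    let ans' := if u > ans then u else ans
    let p := pvPush (pvAdj lad u) visited rest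
    bfsLoop lad p.1 p.2 ans'
termination_by pvM lad visited stack
decreasing_by
  exact pvStep_lt lad visited u rest

def checkStep_alt (lad : List (Int × List Int)) (step : Int) (root : List Int) : Int :=
  -- visited = set(root); visited.add(step); stack = [step]; ans = step; while stack: …
  bfsLoop lad (PySem.Set.add root step) [step] step

-- ===== PRECONDITION & SPEC =====
def Spec_checkStep (lad : List (Int × List Int)) (step : Int) (root : List Int) (out : Int) : Prop := out = checkStep_alt lad step root
instance (lad : List (Int × List Int)) (step : Int) (root : List Int) (out : Int) : Decidable (Spec_checkStep lad step root out) := by unfold Spec_checkStep; infer_instance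

-- ===== CLAIM (what is proved, stated in full; the proofs are below) =====
def Claim_equal_checkStep : Prop := ∀ (lad : List (Int × List Int)) (step : Int) (root : List Int), Dom_checkStep lad step root → Spec_checkStep lad step root (checkStep lad step root)

-- ===== LEMMAS AND PROOFS =====

-- walks from a start node whose later nodes avoid `root` (what both programs explore)
inductive pvWalk (lad : List (Int × List Int)) (root : List Int) : Int → Int → Prop where
  | refl (u : Int) : pvWalk lad root u u
  | cons {u v w : Int} (hv : v ∈ pvAdj lad u) (hr : v ∉ root) (hw : pvWalk lad root v w) :
      pvWalk lad root u w

-- "r is the maximum over {step} ∪ (nodes reachable from step avoiding root)"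
def pvGreatest (lad : List (Int × List Int)) (root : List Int) (step r : Int) : Prop :=
  pvWalk lad root step r ∧ ∀ v, pvWalk lad root step v → v ≤ r

theorem pvGreatest_unique {lad : List (Int × List Int)} {root : List Int} {step r1 r2 : Int}
    (h1 : pvGreatest lad root step r1) (h2 : pvGreatest lad root step r2) : r1 = r2 :=
  le_antisymm (h2.2 _ h1.1) (h1.2 _ h2.1)

theorem pvWalk_snoc {lad : List (Int × List Int)} {root : List Int} {u v : Int}
    (h : pvWalk lad root u v) : ∀ w, w ∈ pvAdj lad v → w ∉ root → pvWalk lad root u w := by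
  induction h with
  | refl u => intro w hw hr; exact .cons hw hr (.refl w)
  | cons hv hrv _ ih => intro w hw hr; exact .cons hv hrv (ih w hw hr)

theorem pvWalk_mono {lad : List (Int × List Int)} {root root' : List Int} {u v : Int}
    (hsub : ∀ x ∈ root, x ∈ root') (h : pvWalk lad root' u v) : pvWalk lad root u v := by
  induction h with
  | refl u => exact .refl u
  | cons hv hr _ ih => exact .cons hv (fun hc => hr (hsub _ hc)) ih

theorem pvWalk_shove {lad : List (Int × List Int)} {root : List Int} {u v : Int} (x : Int)
    (h : pvWalk lad root u v) :
    pvWalk lad (PySem.Set.add root x) u v ∨ pvWalk lad (PySem.Set.add root x) x v := by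
  induction h with
  | refl u => exact Or.inl (.refl u)
  | @cons a b c hv hr _ ih =>
    rcases ih with ih | ih
    · by_cases hx : b = x
      · subst hx; exact Or.inr ih
      · refine Or.inl (.cons hv ?_ ih)
        intro hc
        rcases (PySem.Set.mem_add _ _ _).mp hc with hc | hc
        · exact hr hc
        · exact hx hc
    · exact Or.inr ih

theorem pvAdj_of_none {lad : List (Int × List Int)} {u : Int}
    (h : pvLookup lad u = none) : pvAdj lad u = [] := by
  unfold pvAdj
  rw [PySem.Dict.getD_eq_get?_getD, show (PySem.Dict.mk lad).get? u = none from h]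
  rfl

theorem pvAdj_of_some {lad : List (Int × List Int)} {u : Int} {ladder : List Int}
    (h : pvLookup lad u = some ladder) : pvAdj lad u = ladder := by
  unfold pvAdj
  rw [PySem.Dict.getD_eq_get?_getD, show (PySem.Dict.mk lad).get? u = some ladder from h]
  rfl

-- the loop of A keeps its accumulator …
theorem go_ge_ans (lad : List (Int × List Int)) (root : List Int) :
    ∀ (ladder : List Int) (ans : Int) (hsub : ∀ x ∈ ladder, x ∈ pvNodes lad),
      ans ≤ checkStepGo lad ladder root ans hsub := by
  intro ladder
  induction ladder with
  | nil => intro ans hsub; rw [checkStepGo]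
  | cons l rest ih =>
    intro ans hsub
    rw [checkStepGo]
    by_cases hl : l ∈ root
    · simp only [hl, dif_pos]
      exact ih ans _
    · simp only [hl, dif_neg, not_false_iff]
      refine le_trans ?_ (ih _ _)
      split_ifs with h
      · omega
      · exact le_refl ans

-- … and dominates every recursive call it makes …
theorem go_ge_elem (lad : List (Int × List Int)) (root : List Int) :
    ∀ (ladder : List Int) (ans : Int) (hsub : ∀ x ∈ ladder, x ∈ pvNodes lad) (l : Int),
      l ∈ ladder → l ∉ root →
      checkStep lad l (PySem.Set.add root l) ≤ checkStepGo lad ladder root ans hsub := by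
  intro ladder
  induction ladder with
  | nil => intro ans hsub l hl; simp at hl
  | cons a rest ih =>
    intro ans hsub l hl hr
    rw [checkStepGo]
    by_cases ha : a ∈ root
    · simp only [ha, dif_pos]
      have hlr : l ∈ rest := by
        rcases List.mem_cons.mp hl with rfl | h
        · exact absurd ha hr
        · exact h
      exact ih ans _ l hlr hr
    · simp only [ha, dif_neg, not_false_iff]
      rcases List.mem_cons.mp hl with rfl | h
      · refine le_trans ?_ (go_ge_ans lad root rest _ _)
        split_ifs with h
        · exact le_refl _
        · omega
      · exact ih _ _ l h hr
-- (when l = a the first branch above bounds via the updated accumulator)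

-- … and its result is the accumulator or one of those calls
theorem go_cases (lad : List (Int × List Int)) (root : List Int) :
    ∀ (ladder : List Int) (ans : Int) (hsub : ∀ x ∈ ladder, x ∈ pvNodes lad),
      checkStepGo lad ladder root ans hsub = ans ∨
      ∃ l, l ∈ ladder ∧ l ∉ root ∧
        checkStepGo lad ladder root ans hsub = checkStep lad l (PySem.Set.add root l) := by
  intro ladder
  induction ladder with
  | nil => intro ans hsub; left; rw [checkStepGo]
  | cons a rest ih =>
    intro ans hsub
    rw [checkStepGo]
    by_cases ha : a ∈ root
    · simp only [ha, dif_pos]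
      rcases ih ans _ with h | ⟨l, h1, h2, h3⟩
      · exact Or.inl h
      · exact Or.inr ⟨l, List.mem_cons_of_mem _ h1, h2, h3⟩
    · simp only [ha, dif_neg, not_false_iff]
      rcases ih (if checkStep lad a (PySem.Set.add root a) > ans
          then checkStep lad a (PySem.Set.add root a) else ans) _ with h | ⟨l, h1, h2, h3⟩
      · rw [h]
        split_ifs with hc
        · exact Or.inr ⟨a, List.mem_cons_self, ha, rfl⟩
        · exact Or.inl rfl
      · exact Or.inr ⟨l, List.mem_cons_of_mem _ h1, h2, h3⟩

-- A returns the maximum of {step} ∪ {nodes reachable from step avoiding root}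
theorem A_correct : ∀ (n : Nat) (lad : List (Int × List Int)) (step : Int) (root : List Int),
    pvUnvis lad root = n → pvGreatest lad root step (checkStep lad step root) := by
  intro n
  induction n using Nat.strong_induction_on with
  | _ n IH =>
    intro lad step root hn
    rw [checkStep]
    split
    · rename_i h
      constructor
      · exact .refl step
      · intro v hw
        cases hw with
        | refl => exact le_refl step
        | cons hv hr hw' => rw [pvAdj_of_none h] at hv; simp at hv
    · rename_i ladder h
      have hadj : pvAdj lad step = ladder := pvAdj_of_some h
      constructor
      · rcases go_cases lad root ladder step (pvLookup_subset h) with hc | ⟨l, h1, h2, hc⟩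
        · rw [hc]; exact .refl step
        · rw [hc]
          have hm : pvUnvis lad (PySem.Set.add root l) < n := by
            rw [← hn]
            exact pvUnvis_add_lt (pvLookup_subset h l h1) h2
          have hg := IH _ hm lad l (PySem.Set.add root l) rfl
          have hw := pvWalk_mono (fun x hx => (PySem.Set.mem_add _ _ _).mpr (Or.inl hx)) hg.1
          exact .cons (show l ∈ pvAdj lad step by rw [hadj]; exact h1) h2 hw
      · intro v hw
        cases hw with
        | refl => exact go_ge_ans lad root ladder step _
        | cons hv hr hw' =>
          rename_i b
          have hv' : b ∈ ladder := by rw [hadj] at hv; exact hv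
          have hw2 : pvWalk lad (PySem.Set.add root b) b v := by
            rcases pvWalk_shove b hw' with h2 | h2 <;> exact h2
          have hm : pvUnvis lad (PySem.Set.add root b) < n := by
            rw [← hn]
            exact pvUnvis_add_lt (pvLookup_subset h b hv') hr
          have hg := IH _ hm lad b (PySem.Set.add root b) rfl
          exact le_trans (hg.2 _ hw2) (go_ge_elem lad root ladder step _ b hv' hr)

-- B's loop, under its invariants, ends on the same maximum
theorem B_correct : ∀ (n : Nat) (lad : List (Int × List Int)) (root : List Int) (step : Int)
    (visited stack : List Int) (ans : Int),
    pvM lad visited stack = n →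
    (∀ u ∈ stack, u ∈ visited) →
    stack.Nodup →
    (∀ u ∈ stack, pvWalk lad root step u) →
    pvWalk lad root step ans →
    step ∈ visited →
    (∀ x ∈ root, x ∈ visited) →
    (∀ u ∈ visited, (u ∉ root ∨ u = step) → u ∉ stack →
      (u ≤ ans ∧ ∀ l ∈ pvAdj lad u, l ∈ visited)) →
    pvGreatest lad root step (bfsLoop lad visited stack ans) := by
  intro n
  induction n using Nat.strong_induction_on with
  | _ n IH =>
    intro lad root step visited stack ans hn Hsub Hnd H1 H2 Hstep Hroot H3
    match stack with
    | [] =>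
      rw [bfsLoop]
      refine ⟨H2, ?_⟩
      intro v hw
      have key : ∀ a b, pvWalk lad root a b → a ∈ visited → (a ∉ root ∨ a = step) →
          b ∈ visited ∧ (b ∉ root ∨ b = step) := by
        intro a b hab
        induction hab with
        | refl u => exact fun h1 h2 => ⟨h1, h2⟩
        | cons hv hr _ ih =>
          intro ha hg
          exact ih ((H3 _ ha hg (by simp)).2 _ hv) (Or.inl hr)
      obtain ⟨hv1, hv2⟩ := key _ _ hw Hstep (Or.inr rfl)
      exact (H3 _ hv1 hv2 (by simp)).1
    | u :: rest =>
      rw [bfsLoop]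
      obtain ⟨news, heq, hnd, hmem, hcov⟩ := pvPush_eq (pvAdj lad u) visited rest
      simp only [heq]
      have hlt : pvM lad (visited ++ news) (news.reverse ++ rest) < n := by
        rw [← hn]
        have := pvStep_lt lad visited u rest
        rw [heq] at this
        exact this
      set ans' := if u > ans then u else ans with hans
      have hwu : pvWalk lad root step u := H1 u List.mem_cons_self
      have hnews : ∀ x ∈ news, x ∈ pvAdj lad u ∧ x ∉ visited := hmem
      apply IH _ hlt lad root step (visited ++ news) (news.reverse ++ rest) ans' rfl
      · intro x hx
        rcases List.mem_append.mp hx with hx | hx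
        · rw [List.mem_reverse] at hx
          exact List.mem_append.mpr (Or.inr hx)
        · exact List.mem_append.mpr (Or.inl (Hsub x (List.mem_cons_of_mem _ hx)))
      · rw [List.nodup_append]
        refine ⟨List.nodup_reverse.mpr hnd, (List.nodup_cons.mp Hnd).2, ?_⟩
        intro a ha b hb
        rw [List.mem_reverse] at ha
        intro hab
        subst hab
        exact (hnews a ha).2 (Hsub a (List.mem_cons_of_mem _ hb))
      · intro x hx
        rcases List.mem_append.mp hx with hx | hx
        · rw [List.mem_reverse] at hx
          obtain ⟨hadj, hnv⟩ := hnews x hx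
          exact pvWalk_snoc hwu x hadj (fun hc => hnv (Hroot x hc))
        · exact H1 x (List.mem_cons_of_mem _ hx)
      · rw [hans]
        split_ifs with hc
        · exact hwu
        · exact H2
      · exact List.mem_append.mpr (Or.inl Hstep)
      · intro x hx
        exact List.mem_append.mpr (Or.inl (Hroot x hx))
      · intro w hw hg hns
        rcases List.mem_append.mp hw with hw | hw
        · -- w was already visited
          by_cases hwu' : w = u
          · subst hwu'
            constructor
            · rw [hans]; split_ifs with hc <;> omega
            · intro l hl
              rcases hcov l hl with h | h
              · exact List.mem_append.mpr (Or.inl h)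
              · exact List.mem_append.mpr (Or.inr h)
          · have hnotin : w ∉ u :: rest := by
              intro hc
              rcases List.mem_cons.mp hc with hc | hc
              · exact hwu' hc
              · exact hns (List.mem_append.mpr (Or.inr hc))
            obtain ⟨hle, hcl⟩ := H3 w hw hg hnotin
            constructor
            · rw [hans]; split_ifs with hc <;> omega
            · intro l hl
              exact List.mem_append.mpr (Or.inl (hcl l hl))
        · -- w is newly pushed: but then it is on the new stack, contradiction
          exact absurd (List.mem_append.mpr (Or.inl (List.mem_reverse.mpr hw))) hns

theorem AB_eq (lad : List (Int × List Int)) (step : Int) (root : List Int) :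
    checkStep lad step root = checkStep_alt lad step root := by
  have hA := A_correct (pvUnvis lad root) lad step root rfl
  have hB : pvGreatest lad root step (checkStep_alt lad step root) := by
    unfold checkStep_alt
    apply B_correct (pvM lad (PySem.Set.add root step) [step]) lad root step _ _ step rfl
    · intro x hx
      rcases List.mem_cons.mp hx with rfl | hx
      · exact (PySem.Set.mem_add _ _ _).mpr (Or.inr rfl)
      · simp at hx
    · simp
    · intro x hx
      rcases List.mem_cons.mp hx with rfl | hx
      · exact pvWalk.refl _
      · simp at hx
    · exact .refl step
    · exact (PySem.Set.mem_add _ _ _).mpr (Or.inr rfl)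
    · intro x hx
      exact (PySem.Set.mem_add _ _ _).mpr (Or.inl hx)
    · intro w hw hg hns
      rcases (PySem.Set.mem_add _ _ _).mp hw with h | h
      · rcases hg with hg | hg
        · exact absurd h hg
        · subst hg; simp at hns
      · subst h; simp at hns

  exact pvGreatest_unique hA hB

-- ===== VERDICT (by name: the statement is the Claim_ definition above) =====
theorem checkStep_spec : Claim_equal_checkStep := by
  intro lad step root _
  unfold Spec_checkStep
  exact AB_eq lad step root
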